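-- pv_equiv track=rewrite | github.com/ruizmr/info664 | etl.py | latest_filings
-- ===== SOURCE A (Python) =====
-- from typing import Dict, List, Optional, Tuple, Any
--
-- def latest_filings(submissions: dict, cik: str) -> Dict[str, Optional[str]]:
--     urls = {"10-Q": None, "10-K": None, "S-1": None}
--     try:
--         recent = submissions["filings"]["recent"]
--         forms = recent.get("form", [])
--         accns = recent.get("accessionNumber", [])
--         docs = recent.get("primaryDocument", [])
--         dates = recent.get("filingDate", [])
--         for want in ["10-Q", "10-K", "S-1"]:
--             for i, f in enumerate(forms):
--                 if f == want:
--                     accn = accns[i].replace("-", "")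
--                     doc = docs[i]
--                     urls[want] = f"https://www.sec.gov/Archives/edgar/data/{int(cik)}/{accn}/{doc}"
--                     break
--     except Exception:
--         pass
--     return urls
-- ===== SOURCE B (Python) =====
-- def latest_filings(submissions: dict, cik: str):
--     urls = {"10-Q": None, "10-K": None, "S-1": None}
--     try:
--         recent = submissions["filings"]["recent"]
--         forms = recent.get("form", [])
--         accns = recent.get("accessionNumber", [])
--         docs = recent.get("primaryDocument", [])
--         # single pass: record the first index of each wanted form, stop once all three are seen
--         iq = ik = is1 = None
--         for i, f in enumerate(forms):
--             if f == "10-Q" and iq is None: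
--                 iq = i
--             if f == "10-K" and ik is None:
--                 ik = i
--             if f == "S-1" and is1 is None:
--                 is1 = i
--             if iq is not None and ik is not None and is1 is not None:
--                 break
--         # build URLs in the fixed order, only for forms that occurred
--         for want, idx in (("10-Q", iq), ("10-K", ik), ("S-1", is1)):
--             if idx is not None:
--                 accn = accns[idx].replace("-", "")
--                 doc = docs[idx]
--                 urls[want] = f"https://www.sec.gov/Archives/edgar/data/{int(cik)}/{accn}/{doc}"
--     except Exception:
--         pass
--     return urls
-- ===== Notes on version B (the rewrite author's own statement) =====
-- stated objective: alternative
-- what changed: A scans the forms list once per wanted form type (three separate enumerate scans); B makes a single pass recording the first index of each of 10-Q/10-K/S-1 with an early break once all three are seen, then builds the URLs in the fixed order from that index table.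
import Mathlib
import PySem

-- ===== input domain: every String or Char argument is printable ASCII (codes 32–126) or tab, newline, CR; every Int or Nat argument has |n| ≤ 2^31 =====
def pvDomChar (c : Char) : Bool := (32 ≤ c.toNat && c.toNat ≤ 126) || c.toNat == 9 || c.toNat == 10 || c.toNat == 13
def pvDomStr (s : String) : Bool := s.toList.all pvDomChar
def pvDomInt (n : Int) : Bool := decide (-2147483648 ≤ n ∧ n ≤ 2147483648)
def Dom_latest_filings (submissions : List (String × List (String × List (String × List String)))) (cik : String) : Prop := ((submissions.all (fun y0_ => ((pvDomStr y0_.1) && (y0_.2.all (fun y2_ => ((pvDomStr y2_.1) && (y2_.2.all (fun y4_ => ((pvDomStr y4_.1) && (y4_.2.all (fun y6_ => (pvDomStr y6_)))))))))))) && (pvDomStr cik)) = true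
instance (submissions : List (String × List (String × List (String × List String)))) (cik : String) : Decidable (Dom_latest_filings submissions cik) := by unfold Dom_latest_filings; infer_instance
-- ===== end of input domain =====

-- B replaces A's three separate scans of `forms` (one per wanted form type) by a single pass that
-- records the first index of each of '10-Q','10-K','S-1' (breaking early once all three are seen),
-- followed by URL building in the fixed order; objective: alternative (one scan + index table).

-- shared URL construction, exactly the body of the inner assignment in both Pythons:
-- accns[i].replace("-",""), docs[i], int(cik) — none = the Exception caught by the outer try
def pvMkUrl (accns docs : List String) (cik : String) (i : Nat) : Option String :=
  match PySem.List.pyGet? accns (i : Int) with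
  | none => none
  | some a =>
    match PySem.List.pyGet? docs (i : Int) with
    | none => none
    | some d =>
      match PySem.Int.ofStr? cik with
      | none => none
      | some n =>
        some ("https://www.sec.gov/Archives/edgar/data/" ++ PySem.Int.toStr n ++ "/" ++
              PySem.Str.replace a "-" "" ++ "/" ++ d)

-- the initial dict urls = {"10-Q": None, "10-K": None, "S-1": None}
def pvUrls0 : PySem.Dict String (Option String) :=
  PySem.Dict.mk [("10-Q", none), ("10-K", none), ("S-1", none)]

-- ===== PORT A =====
-- A's inner loop: for i, f in enumerate(forms): if f == want: build; break
-- result: none = exception escaped; some none = not found; some (some u) = url built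
def pvScanA (accns docs : List String) (cik : String) (want : String) : Nat → List String → Option (Option String)
  | _, [] => some none
  | i, f :: rest =>
    if f = want then
      match pvMkUrl accns docs cik i with
      | none => none
      | some u => some (some u)
    else pvScanA accns docs cik want (i + 1) rest

-- A's outer loop over ["10-Q","10-K","S-1"]; an exception aborts, keeping urls as built so far
def pvLoopA (forms accns docs : List String) (cik : String) :
    PySem.Dict String (Option String) → List String → PySem.Dict String (Option String)
  | urls, [] => urls
  | urls, w :: ws =>
    match pvScanA accns docs cik w 0 forms with
    | none => urls
    | some none => pvLoopA forms accns docs cik urls ws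
    | some (some u) => pvLoopA forms accns docs cik (urls.insert w (some u)) ws

def latest_filings (submissions : List (String × List (String × List (String × List String)))) (cik : String) : List (String × Option String) :=
  let urls := pvUrls0
  match (PySem.Dict.mk submissions).get? "filings" with
  | none => urls.items  -- KeyError caught
  | some filings =>
    match (PySem.Dict.mk filings).get? "recent" with
    | none => urls.items  -- KeyError caught
    | some recent =>
      let r := PySem.Dict.mk recent
      let forms := r.getD "form" []
      let accns := r.getD "accessionNumber" []
      let docs := r.getD "primaryDocument" []
      -- dates = recent.get("filingDate", []) is unused and cannot raise
      (pvLoopA forms accns docs cik urls ["10-Q", "10-K", "S-1"]).items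

-- ===== PORT B =====
-- B's single pass: iq/ik/is1 = first index of each wanted form, break once all three are set
def pvScan3 : Option Nat → Option Nat → Option Nat → Nat → List String → Option Nat × Option Nat × Option Nat
  | q, k, s, _, [] => (q, k, s)
  | q, k, s, i, f :: rest =>
    let q' := if f = "10-Q" ∧ q = none then some i else q
    let k' := if f = "10-K" ∧ k = none then some i else k
    let s' := if f = "S-1" ∧ s = none then some i else s
    if q'.isSome ∧ k'.isSome ∧ s'.isSome then (q', k', s')
    else pvScan3 q' k' s' (i + 1) rest

-- B's second loop: for want, idx in pairs: if idx is not None: build (an exception aborts)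
def pvBuildB (accns docs : List String) (cik : String) :
    PySem.Dict String (Option String) → List (String × Option Nat) → PySem.Dict String (Option String)
  | urls, [] => urls
  | urls, (_, none) :: rest => pvBuildB accns docs cik urls rest
  | urls, (w, some i) :: rest =>
    match pvMkUrl accns docs cik i with
    | none => urls
    | some u => pvBuildB accns docs cik (urls.insert w (some u)) rest

def latest_filings_alt (submissions : List (String × List (String × List (String × List String)))) (cik : String) : List (String × Option String) :=
  let urls := pvUrls0
  match (PySem.Dict.mk submissions).get? "filings" with
  | none => urls.items
  | some filings =>
    match (PySem.Dict.mk filings).get? "recent" with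
    | none => urls.items
    | some recent =>
      let r := PySem.Dict.mk recent
      let forms := r.getD "form" []
      let accns := r.getD "accessionNumber" []
      let docs := r.getD "primaryDocument" []
      match pvScan3 none none none 0 forms with
      | (iq, ik, is1) =>
        (pvBuildB accns docs cik urls [("10-Q", iq), ("10-K", ik), ("S-1", is1)]).items

-- ===== PRECONDITION & SPEC =====  (A catches every exception: total, no Pre_)
def Spec_latest_filings (submissions : List (String × List (String × List (String × List String)))) (cik : String) (out : List (String × Option String)) : Prop := out = latest_filings_alt submissions cik
instance (submissions : List (String × List (String × List (String × List String)))) (cik : String) (out : List (String × Option String)) : Decidable (Spec_latest_filings submissions cik out) := by unfold Spec_latest_filings; infer_instance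

-- ===== CLAIM =====
def Claim_equal_latest_filings : Prop := ∀ (submissions : List (String × List (String × List (String × List String)))) (cik : String), Dom_latest_filings submissions cik → Spec_latest_filings submissions cik (latest_filings submissions cik)

-- ===== LEMMAS AND PROOFS =====

-- first index ≥ i at which w occurs in the list (proof-side characterisation of both scans)
def pvFOcc (w : String) : Nat → List String → Option Nat
  | _, [] => none
  | i, f :: rest => if f = w then some i else pvFOcc w (i + 1) rest

theorem pvScanA_eq (accns docs : List String) (cik w : String) :
    ∀ (L : List String) (i : Nat),
      pvScanA accns docs cik w i L =
        match pvFOcc w i L with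
        | none => some none
        | some j =>
          match pvMkUrl accns docs cik j with
          | none => none
          | some u => some (some u) := by
  intro L
  induction L with
  | nil => intro i; simp [pvScanA, pvFOcc]
  | cons f rest ih =>
    intro i
    by_cases hf : f = w <;> simp [pvScanA, pvFOcc, hf, ih]

theorem pvScan3_eq :
    ∀ (L : List String) (q k s : Option Nat) (i : Nat),
      pvScan3 q k s i L =
        (q.or (pvFOcc "10-Q" i L), k.or (pvFOcc "10-K" i L), s.or (pvFOcc "S-1" i L)) := by
  intro L
  induction L with
  | nil => intro q k s i; simp [pvScan3, pvFOcc]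
  | cons f rest ih =>
    intro q k s i
    rcases q with _ | jq <;> rcases k with _ | jk <;> rcases s with _ | js <;>
      by_cases hq : f = "10-Q" <;> by_cases hk : f = "10-K" <;> by_cases hs : f = "S-1" <;>
        simp_all [pvScan3, pvFOcc]

theorem pvLoopA_eq_pvBuildB (forms accns docs : List String) (cik : String) :
    ∀ (ws : List String) (urls : PySem.Dict String (Option String)),
      pvLoopA forms accns docs cik urls ws =
        pvBuildB accns docs cik urls (ws.map (fun w => (w, pvFOcc w 0 forms))) := by
  intro ws
  induction ws with
  | nil => intro urls; rfl
  | cons w ws ih =>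
    intro urls
    simp only [pvLoopA, List.map, pvScanA_eq]
    cases hocc : pvFOcc w 0 forms with
    | none => simp [pvBuildB, ih]
    | some j =>
      cases hurl : pvMkUrl accns docs cik j with
      | none => simp [pvBuildB, hurl]
      | some u => simp [pvBuildB, hurl, ih]

-- ===== VERDICT (by name: the statement is the Claim_ definition above) =====
theorem latest_filings_spec : Claim_equal_latest_filings := by
  intro submissions cik _
  unfold Spec_latest_filings latest_filings latest_filings_alt
  cases (PySem.Dict.mk submissions).get? "filings" with
  | none => rfl
  | some filings =>
    dsimp only
    cases (PySem.Dict.mk filings).get? "recent" with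
    | none => rfl
    | some recent =>
      dsimp only
      simp only [pvScan3_eq, Option.none_or, pvLoopA_eq_pvBuildB, List.map]
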